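-- pv_equiv track=rewrite | github.com/ls-2018/py | Python程序员面试算法宝典/排列组合与概率/7、如何判断还有几盏灯亮着.py | factorIsOdd
-- ===== SOURCE A (Python) =====
-- def factorIsOdd(a):
--     total = 0
--     i = 1
--     while i < a:
--         if a % i == 0:
--             total += 1
--         i += 1
--     if total % 2 == 1:
--         return 1
--     else:
--         return 0
-- ===== SOURCE B (Python) =====
-- def factorIsOdd(a):
--     # a positive number has an odd count of proper divisors iff it is not a perfect square
--     if a <= 1:
--         return 0
--     r = 1
--     while (r + 1) * (r + 1) <= a:
--         r += 1
--     return 0 if r * r == a else 1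
-- ===== Notes on version B (the rewrite author's own statement) =====
-- stated objective: faster
-- what changed: Replaces the O(a) trial scan over all i < a by the perfect-square characterisation: a positive number has an odd number of proper divisors iff it is not a perfect square, tested with an O(sqrt(a)) integer-square-root loop.
import Mathlib
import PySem

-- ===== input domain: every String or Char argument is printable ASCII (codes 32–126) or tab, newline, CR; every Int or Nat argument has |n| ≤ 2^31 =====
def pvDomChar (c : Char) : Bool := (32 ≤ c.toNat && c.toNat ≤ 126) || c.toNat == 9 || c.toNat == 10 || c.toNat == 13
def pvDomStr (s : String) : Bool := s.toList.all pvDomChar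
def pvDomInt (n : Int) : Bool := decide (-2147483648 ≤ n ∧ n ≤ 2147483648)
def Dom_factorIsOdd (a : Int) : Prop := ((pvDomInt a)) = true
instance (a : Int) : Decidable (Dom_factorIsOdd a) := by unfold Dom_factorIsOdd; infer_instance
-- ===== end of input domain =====

-- B replaces A's O(a) scan over all i < a by the perfect-square characterisation
-- (a positive number has an odd number of proper divisors iff it is not a perfect
-- square), tested with an integer-square-root loop.

-- ===== PORT A =====
-- the 'while i < a' loop of A, carrying (total, i)
def factorIsOddLoop (a : Int) (total : Int) (i : Int) : Int :=
  if i < a then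
    factorIsOddLoop a (if PySem.Int.mod a i = 0 then total + 1 else total) (i + 1)
  else total
termination_by (a - i).toNat
decreasing_by omega

def factorIsOdd (a : Int) : Int :=
  if PySem.Int.mod (factorIsOddLoop a 0 1) 2 = 1 then 1 else 0

-- ===== PORT B =====
-- the 'while (r+1)*(r+1) <= a' loop of B
def factorIsOddIsqrt (a : Int) (r : Int) : Int :=
  if (r + 1) * (r + 1) ≤ a then factorIsOddIsqrt a (r + 1) else r
termination_by (a - r).toNat
decreasing_by
  have hr : r < a := by nlinarith
  omega

def factorIsOdd_alt (a : Int) : Int :=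
  if a ≤ 1 then 0
  else if factorIsOddIsqrt a 1 * factorIsOddIsqrt a 1 = a then 0 else 1

-- ===== PRECONDITION & SPEC =====
def Spec_factorIsOdd (a : Int) (out : Int) : Prop := out = factorIsOdd_alt a
instance (a : Int) (out : Int) : Decidable (Spec_factorIsOdd a out) := by unfold Spec_factorIsOdd; infer_instance

-- ===== CLAIM (what is proved, stated in full; the proofs are below) =====
def Claim_equal_factorIsOdd : Prop := ∀ (a : Int), Dom_factorIsOdd a → Spec_factorIsOdd a (factorIsOdd a)

-- ===== LEMMAS AND PROOFS =====

-- A's loop counts the d ∈ [i, a) with a % d = 0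
theorem factorIsOddLoop_eq (a : Int) (total i : Int) :
    factorIsOddLoop a total i =
      total + (((Finset.Ico i a).filter (fun d => PySem.Int.mod a d = 0)).card : Int) := by
  rw [factorIsOddLoop]
  split
  · next h =>
    rw [factorIsOddLoop_eq a _ (i+1)]
    have hset : Finset.Ico i a = insert i (Finset.Ico (i+1) a) := by
      ext x; simp only [Finset.mem_Ico, Finset.mem_insert]; omega
    rw [hset, Finset.filter_insert]
    by_cases hp : PySem.Int.mod a i = 0
    · rw [if_pos hp, if_pos hp, Finset.card_insert_of_notMem (by simp [Finset.mem_Ico])]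
      push_cast; ring
    · rw [if_neg hp, if_neg hp]
  · next h =>
    rw [Finset.Ico_eq_empty (by omega)]
    simp
termination_by (a - i).toNat
decreasing_by omega


theorem count_cast (a : Int) (ha : 2 ≤ a) :
    ((Finset.Ico (1:Int) a).filter (fun d => PySem.Int.mod a d = 0)).card
      = ((Finset.Ico 1 a.toNat).filter (fun d => d ∣ a.toNat)).card := by
  apply Finset.card_nbij' (i := Int.toNat) (j := (Nat.cast : ℕ → ℤ))
  · intro d hd
    simp only [Finset.mem_coe, Finset.mem_filter, Finset.mem_Ico, PySem.Int.mod_eq_zero_iff_dvd] at hd ⊢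
    obtain ⟨⟨h1, h2⟩, h3⟩ := hd
    refine ⟨⟨by omega, by omega⟩, ?_⟩
    rw [← Int.natCast_dvd_natCast]
    simpa [Int.toNat_of_nonneg (by omega : (0:ℤ) ≤ d), Int.toNat_of_nonneg (by omega : (0:ℤ) ≤ a)] using h3
  · intro d hd
    simp only [Finset.mem_coe, Finset.mem_filter, Finset.mem_Ico, PySem.Int.mod_eq_zero_iff_dvd] at hd ⊢
    obtain ⟨⟨h1, h2⟩, h3⟩ := hd
    refine ⟨⟨by exact_mod_cast h1, by omega⟩, ?_⟩
    have := Int.natCast_dvd_natCast.mpr h3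
    rwa [Int.toNat_of_nonneg (by omega : (0:ℤ) ≤ a)] at this
  · intro d hd
    simp only [Finset.mem_coe, Finset.mem_filter, Finset.mem_Ico] at hd
    omega
  · intro d hd
    simp

theorem card_lo_eq_card_hi (n : ℕ) (hn : n ≠ 0) :
    ((n.divisors).filter (fun d => d * d < n)).card
      = ((n.divisors).filter (fun d => n < d * d)).card := by
  apply Finset.card_nbij' (i := fun d => n / d) (j := fun d => n / d)
  · intro d hd
    simp only [Finset.mem_coe, Finset.mem_filter, Nat.mem_divisors] at hd ⊢
    obtain ⟨⟨hdvd, _⟩, hlt⟩ := hd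
    obtain ⟨k, hk⟩ := hdvd
    have hd0 : d ≠ 0 := by rintro rfl; simp at hk; omega
    have hkey : n / d = k := by rw [hk]; exact Nat.mul_div_cancel_left k (Nat.pos_of_ne_zero hd0)
    have hdk : d < k := by
      by_contra hle
      push_neg at hle
      have : d * k ≤ d * d := Nat.mul_le_mul_left d hle
      omega
    refine ⟨⟨⟨d, by rw [hkey, hk, Nat.mul_comm]⟩, hn⟩, ?_⟩
    rw [hkey]
    nlinarith [hk, hdk]
  · intro d hd
    simp only [Finset.mem_coe, Finset.mem_filter, Nat.mem_divisors] at hd ⊢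
    obtain ⟨⟨hdvd, _⟩, hlt⟩ := hd
    obtain ⟨k, hk⟩ := hdvd
    have hd0 : d ≠ 0 := by rintro rfl; simp at hk; omega
    have hkey : n / d = k := by rw [hk]; exact Nat.mul_div_cancel_left k (Nat.pos_of_ne_zero hd0)
    have hdk : k < d := by
      by_contra hle
      push_neg at hle
      have : d * d ≤ d * k := Nat.mul_le_mul_left d hle
      omega
    have hk0 : k ≠ 0 := by rintro rfl; omega
    refine ⟨⟨⟨d, by rw [hkey, hk, Nat.mul_comm]⟩, hn⟩, ?_⟩
    rw [hkey]
    have : 1 ≤ k := Nat.pos_of_ne_zero hk0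
    nlinarith [hk, hdk]
  · intro d hd
    simp only [Finset.mem_coe, Finset.mem_filter, Nat.mem_divisors] at hd
    exact Nat.div_div_self hd.1.1 hn
  · intro d hd
    simp only [Finset.mem_coe, Finset.mem_filter, Nat.mem_divisors] at hd
    exact Nat.div_div_self hd.1.1 hn

theorem card_mid (n : ℕ) (hn : n ≠ 0) :
    ((n.divisors).filter (fun d => d * d = n)).card = if IsSquare n then 1 else 0 := by
  split
  · next h =>
    obtain ⟨t, ht⟩ := h
    have : (n.divisors).filter (fun d => d * d = n) = {t} := by
      ext d
      simp only [Finset.mem_coe, Finset.mem_filter, Nat.mem_divisors, Finset.mem_singleton]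
      constructor
      · rintro ⟨_, hd⟩
        nlinarith [hd, ht]
      · intro hdt
        subst hdt
        exact ⟨⟨⟨_, ht⟩, hn⟩, ht.symm⟩
    rw [this, Finset.card_singleton]
  · next h =>
    rw [Finset.card_eq_zero, Finset.filter_eq_empty_iff]
    intro d _ hd
    exact h ⟨d, hd.symm⟩

theorem proper_card (n : ℕ) (hn : 2 ≤ n) :
    ((Finset.Ico 1 n).filter (fun d => d ∣ n)).card % 2 = if IsSquare n then 0 else 1 := by
  have hn0 : n ≠ 0 := by omega
  have hD : (Finset.Ico 1 n).filter (fun d => d ∣ n) = n.divisors.erase n := by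
    ext d
    simp only [Finset.mem_coe, Finset.mem_filter, Finset.mem_Ico, Finset.mem_erase, Nat.mem_divisors]
    constructor
    · rintro ⟨⟨h1, h2⟩, h3⟩; exact ⟨by omega, h3, hn0⟩
    · rintro ⟨h1, h2, _⟩
      have hd0 : d ≠ 0 := by rintro rfl; exact hn0 (Nat.eq_zero_of_zero_dvd h2)
      have := Nat.le_of_dvd (by omega) h2
      exact ⟨⟨by omega, by omega⟩, h2⟩
  have hmem : n ∈ n.divisors := Nat.mem_divisors_self n hn0
  have hsplit1 := Finset.filter_card_add_filter_neg_card_eq_card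
    (s := n.divisors) (p := fun d => d * d < n)
  have hsplit2 := Finset.filter_card_add_filter_neg_card_eq_card
    (s := n.divisors.filter (fun d => ¬ d * d < n)) (p := fun d => d * d = n)
  rw [Finset.filter_filter, Finset.filter_filter] at hsplit2
  have he1 : (n.divisors.filter (fun d => ¬ d * d < n ∧ d * d = n))
      = (n.divisors.filter (fun d => d * d = n)) := by
    apply Finset.filter_congr; intro d _; constructor
    · rintro ⟨_, h⟩; exact h
    · intro h; exact ⟨by omega, h⟩
  have he2 : (n.divisors.filter (fun d => ¬ d * d < n ∧ ¬ d * d = n))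
      = (n.divisors.filter (fun d => n < d * d)) := by
    apply Finset.filter_congr; intro d _; constructor
    · rintro ⟨h1, h2⟩; omega
    · intro h; omega
  rw [he1, he2] at hsplit2
  have hlo := card_lo_eq_card_hi n hn0
  have hmid := card_mid n hn0
  have hone : 1 ∈ n.divisors.filter (fun d => d * d < n) := by
    simp only [Finset.mem_coe, Finset.mem_filter, Nat.mem_divisors]
    exact ⟨⟨Nat.one_dvd n, hn0⟩, by omega⟩
  have hlopos : 1 ≤ (n.divisors.filter (fun d => d * d < n)).card :=
    Finset.card_pos.mpr ⟨1, hone⟩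
  rw [hD, Finset.card_erase_of_mem hmem]
  split
  · next h => rw [if_pos h] at hmid; omega
  · next h => rw [if_neg h] at hmid; omega

-- B's loop computes the integer square root (for 1 ≤ r, r² ≤ a)
theorem isqrt_bounds (a : Int) (r : Int) (hr : 1 ≤ r) (hra : r * r ≤ a) :
    1 ≤ factorIsOddIsqrt a r ∧ factorIsOddIsqrt a r * factorIsOddIsqrt a r ≤ a ∧
      a < (factorIsOddIsqrt a r + 1) * (factorIsOddIsqrt a r + 1) := by
  rw [factorIsOddIsqrt]
  split
  · next h => exact isqrt_bounds a (r + 1) (by omega) h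
  · next h => exact ⟨hr, hra, by omega⟩
termination_by (a - r).toNat
decreasing_by
  have : r < a := by nlinarith
  omega

theorem isqrt_square_iff (a : Int) (ha : 2 ≤ a) :
    (factorIsOddIsqrt a 1 * factorIsOddIsqrt a 1 = a) ↔ IsSquare a.toNat := by
  obtain ⟨h1, h2, h3⟩ := isqrt_bounds a 1 (by omega) (by omega)
  constructor
  · intro h
    refine ⟨(factorIsOddIsqrt a 1).toNat, ?_⟩
    have := Int.toNat_of_nonneg (by omega : (0:ℤ) ≤ factorIsOddIsqrt a 1)
    zify
    rw [Int.toNat_of_nonneg (by omega : (0:ℤ) ≤ a), this]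
    omega
  · rintro ⟨t, ht⟩
    have hta : ((t : ℤ)) * t = a := by
      have : ((a.toNat : ℤ)) = a := Int.toNat_of_nonneg (by omega)
      rw [← this]; exact_mod_cast ht.symm
    have ht0 : (0:ℤ) ≤ (t:ℤ) := by positivity
    have heq : (t : ℤ) = factorIsOddIsqrt a 1 := by nlinarith
    rw [← heq]; exact hta

-- ===== VERDICT (by name: the statement is the Claim_ definition above) =====
theorem factorIsOdd_spec : Claim_equal_factorIsOdd := by
  intro a _
  unfold Spec_factorIsOdd factorIsOdd factorIsOdd_alt
  by_cases ha : a ≤ 1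
  · rw [if_pos ha, factorIsOddLoop_eq, Finset.Ico_eq_empty (by omega)]
    norm_num
  · have ha2 : 2 ≤ a := by omega
    rw [if_neg ha, factorIsOddLoop_eq, count_cast a ha2]
    have hp := proper_card a.toNat (by omega)
    have hmod : PySem.Int.mod ((0:ℤ) + (((Finset.Ico 1 a.toNat).filter (fun d => d ∣ a.toNat)).card : ℤ)) 2
        = ((((Finset.Ico 1 a.toNat).filter (fun d => d ∣ a.toNat)).card % 2 : ℕ) : ℤ) := by
      rw [zero_add]
      exact_mod_cast PySem.Int.mod_natCast _ 2
    rw [hmod]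
    by_cases hsq : IsSquare a.toNat
    · rw [if_pos hsq] at hp
      rw [if_pos ((isqrt_square_iff a ha2).mpr hsq), hp]
      norm_num
    · rw [if_neg hsq] at hp
      rw [if_neg (fun h => hsq ((isqrt_square_iff a ha2).mp h)), hp]
      norm_num
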